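-- pv_equiv track=rewrite | github.com/Raposones/Compiladores-2022.1 | Trabalho 4/available_expr.py | get_gen_kill
-- ===== SOURCE A (Python) =====
-- def get_gen_kill(b, b_expr):
--     b_lines = b[0]
--     gen = []
--     kill = []
--     for ind, expr in enumerate(b_expr):
--         live = True
--         for line in b_lines[ind:]:
--             line = line.split(' = ')
--             line_var = line[0]
--             line_expr = line[1]
--             if line_var in expr:
--                 live = False
--             if line_expr == expr:
--                 live = True
--         if live:
--             gen.append(expr)
--         else:
--             kill.append(expr)
--     return gen, kill
-- ===== SOURCE B (Python) =====
-- def get_gen_kill(b, b_expr):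
--     lines = b[0]
--
--     def live(ind, expr):
--         # Backward scan: the last effective assignment decides, so the first
--         # decisive line seen from the end settles liveness and we stop there.
--         for line in reversed(lines[ind:]):
--             parts = line.split(' = ')
--             if parts[1] == expr:
--                 return True
--             if parts[0] in expr:
--                 return False
--         return True
--
--     flags = [live(i, e) for i, e in enumerate(b_expr)]
--     gen = [e for e, f in zip(b_expr, flags) if f]
--     kill = [e for e, f in zip(b_expr, flags) if not f]
--     return gen, kill
-- ===== Notes on version B (the rewrite author's own statement) =====
-- stated objective: alternative
-- what changed: The forward full scan with a last-match-wins live flag is replaced by a helper predicate doing a backward scan that returns at the first decisive line, and gen/kill are built by two comprehensions over the computed flags instead of an if/append accumulator loop.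
import Mathlib
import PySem

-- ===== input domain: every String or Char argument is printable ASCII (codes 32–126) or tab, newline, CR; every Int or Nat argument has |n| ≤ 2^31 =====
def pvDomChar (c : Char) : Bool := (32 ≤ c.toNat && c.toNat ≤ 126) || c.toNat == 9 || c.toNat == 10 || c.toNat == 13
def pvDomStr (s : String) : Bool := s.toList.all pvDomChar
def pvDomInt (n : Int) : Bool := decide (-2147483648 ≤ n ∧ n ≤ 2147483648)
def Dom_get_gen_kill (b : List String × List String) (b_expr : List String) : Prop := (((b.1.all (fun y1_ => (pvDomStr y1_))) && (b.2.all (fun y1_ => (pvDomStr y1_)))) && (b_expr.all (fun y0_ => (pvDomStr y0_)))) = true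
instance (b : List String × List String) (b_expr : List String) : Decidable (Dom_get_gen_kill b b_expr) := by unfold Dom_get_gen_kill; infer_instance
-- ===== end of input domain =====

-- B replaces A's forward last-match-wins scan by a backward first-decisive-line scan with
-- early exit, and builds gen/kill by comprehensions over the liveness flags (alternative
-- decomposition, same asymptotic cost).

-- ===== PORT A =====
-- inner loop: 'for line in b_lines[ind:]' updating the live flag
def aStep (expr : String) (live : Bool) (line : String) : Bool :=
  let parts := (PySem.Str.split? line " = ").getD []  -- sep literal is nonempty, so split? = some (exact)
  let line_var := PySem.List.pyGetD parts 0 ""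
  let line_expr := PySem.List.pyGetD parts 1 ""   -- parts[1]: IndexError when ' = ' absent (excluded by Pre_)
  let live := if PySem.Str.isIn line_var expr then false else live
  if line_expr == expr then true else live

def get_gen_kill (b : List String × List String) (b_expr : List String) : List String × List String :=
  let b_lines := b.1
  (PySem.List.enumerate b_expr).foldl
    (fun (gk : List String × List String) p =>
      let live := (PySem.List.slice b_lines (some p.1) none).foldl (aStep p.2) true
      if live then (gk.1 ++ [p.2], gk.2) else (gk.1, gk.2 ++ [p.2]))
    ([], [])

-- ===== PORT B =====
-- backward scan: first decisive line settles liveness, else live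
def bScan (expr : String) : List String → Bool
  | [] => true
  | line :: rest =>
      let parts := (PySem.Str.split? line " = ").getD []  -- sep literal is nonempty, so split? = some (exact)
      if PySem.List.pyGetD parts 1 "" == expr then true
      else if PySem.Str.isIn (PySem.List.pyGetD parts 0 "") expr then false
      else bScan expr rest

def bLive (lines : List String) (ind : Int) (expr : String) : Bool :=
  bScan expr (PySem.List.slice lines (some ind) none).reverse

def get_gen_kill_alt (b : List String × List String) (b_expr : List String) : List String × List String :=
  let flags := (PySem.List.enumerate b_expr).map (fun p => bLive b.1 p.1 p.2)
  (((b_expr.zip flags).filter (fun q => q.2)).map (·.1),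
   ((b_expr.zip flags).filter (fun q => !q.2)).map (·.1))

-- ===== PRECONDITION & SPEC =====
-- Pre_ excludes exactly the inputs where Python A raises IndexError: a nonempty b_expr
-- makes A read parts[1] of every line of b.1, so every line must contain ' = '.
def Pre_get_gen_kill (b : List String × List String) (b_expr : List String) : Prop :=
  b_expr = [] ∨ (b.1.all (fun line => PySem.Str.isIn " = " line)) = true
instance (b : List String × List String) (b_expr : List String) : Decidable (Pre_get_gen_kill b b_expr) := by unfold Pre_get_gen_kill; infer_instance

def pvWitness_get_gen_kill : (List String × List String) × List String :=
  ((["x = a + b", "y = x + 1"], []), ["a + b", "x + 1"])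

def Spec_get_gen_kill (b : List String × List String) (b_expr : List String) (out : List String × List String) : Prop := out = get_gen_kill_alt b b_expr
instance (b : List String × List String) (b_expr : List String) (out : List String × List String) : Decidable (Spec_get_gen_kill b b_expr out) := by unfold Spec_get_gen_kill; infer_instance

-- ===== CLAIM (what is proved, stated in full; the proofs are below) =====
def Claim_equal_get_gen_kill : Prop := ∀ (b : List String × List String) (b_expr : List String), Dom_get_gen_kill b b_expr → Pre_get_gen_kill b b_expr → Spec_get_gen_kill b b_expr (get_gen_kill b b_expr)

-- ===== LEMMAS AND PROOFS =====

-- Forward last-match-wins fold = backward first-decisive scan (holds for every line list,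
-- the line step functions being identical branch for branch).
theorem scan_eq (expr : String) (lines : List String) :
    lines.foldl (aStep expr) true = bScan expr lines.reverse := by
  induction lines using List.reverseRecOn with
  | nil => rfl
  | append_singleton xs x ih =>
      rw [List.foldl_append, List.reverse_append]
      simp only [List.foldl_cons, List.foldl_nil, List.reverse_cons, List.reverse_nil,
        List.nil_append, List.singleton_append, bScan, aStep]
      split_ifs with h1 h2 <;> simp_all

-- The accumulator loop over enumerate equals filtering by the flags.
theorem fold_eq_filter (c : Int × String → Bool) (l : List (Int × String)) (g0 k0 : List String) :
    l.foldl (fun (gk : List String × List String) p =>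
        if c p then (gk.1 ++ [p.2], gk.2) else (gk.1, gk.2 ++ [p.2])) (g0, k0)
      = (g0 ++ (l.filter c).map (·.2), k0 ++ (l.filter (fun p => !c p)).map (·.2)) := by
  induction l generalizing g0 k0 with
  | nil => simp
  | cons p t ih =>
      simp only [List.foldl_cons, List.filter_cons]
      by_cases h : c p <;> simp [h, ih]

-- zip b_expr with the flag list over enumerate = enumerate paired pointwise.
theorem zip_flags (b_expr : List String) (f : Int × String → Bool) (s : Int) :
    b_expr.zip ((PySem.List.enumerate b_expr s).map f)
      = (PySem.List.enumerate b_expr s).map (fun p => (p.2, f p)) := by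
  induction b_expr generalizing s with
  | nil => rfl
  | cons x t ih => simp [PySem.List.enumerate_cons, ih]

theorem alt_eq_fold (b : List String × List String) (b_expr : List String) :
    get_gen_kill_alt b b_expr
      = (((PySem.List.enumerate b_expr).filter (fun p => bLive b.1 p.1 p.2)).map (·.2),
         ((PySem.List.enumerate b_expr).filter (fun p => !bLive b.1 p.1 p.2)).map (·.2)) := by
  unfold get_gen_kill_alt
  simp only []
  rw [zip_flags b_expr (fun p => bLive b.1 p.1 p.2) 0]
  simp [List.filter_map, List.map_map, Function.comp_def]

-- ===== VERDICT (by name: the statement is the Claim_ definition above) =====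
theorem get_gen_kill_spec : Claim_equal_get_gen_kill := by
  intro b b_expr _ _
  unfold Spec_get_gen_kill
  rw [alt_eq_fold]
  unfold get_gen_kill
  have hstep : ∀ (gk : List String × List String) (p : Int × String),
      (let live := (PySem.List.slice b.1 (some p.1) none).foldl (aStep p.2) true
       if live then (gk.1 ++ [p.2], gk.2) else (gk.1, gk.2 ++ [p.2]))
      = (if bLive b.1 p.1 p.2 then (gk.1 ++ [p.2], gk.2) else (gk.1, gk.2 ++ [p.2])) := by
    intro gk p
    simp only [← scan_eq, bLive]
  simp only [hstep]
  rw [fold_eq_filter (fun p => bLive b.1 p.1 p.2)]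
  simp
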